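-- pv_equiv track=rewrite | github.com/fineman999/Algorithm | Elice/DynamicProgramming/chinese_restaurant.py | eating
-- ===== SOURCE A (Python) =====
-- def eating(data) :
--     '''
--     각 날짜 별 음식의 선호도가 list로 주어질 때, 상훈이가 얻을 수 있는 선호도 총합의 최댓값을 반환하는 함수를 작성하세요.
--     answer[i][j] = max(answer[i-1])
--     '''
--     answer = []
--     answer.append(data[0])
--     for i in range(1,len(data)):
--         answer_init = []
--         for j in range(len(data[0])):
--             answer_max = 0
--             for k in range(len(data[0])):
--                 if j != k:
--                     answer_max = max(answer[i-1][k], answer_max)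
--             answer_init.append(answer_max + data[i][j])
--         answer.append(answer_init)
--     result = max(answer[-1])
--     return result
-- ===== SOURCE B (Python) =====
-- def eating(data):
--     prev = list(data[0])
--     m = len(prev)
--     for row in data[1:]:
--         # suffix maxima clamped at 0: suf[j] = max(0, prev[j], ..., prev[m-1])
--         suf = [0] * (m + 1)
--         for j in range(m - 1, -1, -1):
--             suf[j] = max(suf[j + 1], prev[j])
--         cur = []
--         run = 0  # max(0, prev[0..j-1])
--         for j in range(m):
--             cur.append(max(run, suf[j + 1]) + row[j])
--             run = max(run, prev[j])
--         prev = cur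
--     return max(prev)
-- ===== Notes on version B (the rewrite author's own statement) =====
-- stated objective: faster
-- what changed: B replaces A's inner scan over all other days (O(m) per cell, rebuilt for every j) with one clamped suffix-maxima pass plus a running prefix maximum per row, so the best previous value excluding day j comes from two precomputed maxima.
import Mathlib
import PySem

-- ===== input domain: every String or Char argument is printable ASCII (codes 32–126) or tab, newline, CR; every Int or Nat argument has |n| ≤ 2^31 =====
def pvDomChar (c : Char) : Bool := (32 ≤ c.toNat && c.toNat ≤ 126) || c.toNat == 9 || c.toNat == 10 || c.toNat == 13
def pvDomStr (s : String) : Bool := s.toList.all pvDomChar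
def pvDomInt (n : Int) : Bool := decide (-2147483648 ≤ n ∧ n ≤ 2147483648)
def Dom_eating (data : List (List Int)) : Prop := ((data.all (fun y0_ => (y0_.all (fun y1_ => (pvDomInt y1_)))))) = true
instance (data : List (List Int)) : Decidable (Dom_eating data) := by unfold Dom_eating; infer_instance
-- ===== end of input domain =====

-- B replaces A's O(m) inner scan per cell by one clamped suffix-maxima pass plus a
-- running prefix maximum per row (O(n*m) instead of O(n*m^2)); same return value.

-- ===== PORT A =====
-- Python's max() on a list (0 outside Pre_, where Python raises ValueError)
def pyMax : List Int → Int
  | [] => 0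
  | x :: xs => xs.foldl max x

-- the k-loop: answer_max starts at 0, takes max over k ≠ j of prev[k]
def eatingInner (prev : List Int) (m j : Nat) : Int :=
  (List.range m).foldl (fun acc k => if j ≠ k then max (prev.getD k 0) acc else acc) 0

-- the j-loop building answer_init
def eatingRow (prev row : List Int) (m : Nat) : List Int :=
  (List.range m).foldl (fun li j => li ++ [eatingInner prev m j + row.getD j 0]) []

def eating (data : List (List Int)) : Int :=
  let m := (data.headD []).length
  let ans := (data.drop 1).foldl
    (fun ans row => ans ++ [eatingRow (ans.getLastD []) row m]) [data.headD []]
  pyMax (ans.getLastD [])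

-- ===== PORT B =====
-- the backward loop: suf has length m+1, suf[j] = max(suf[j+1], prev[j]), suf[m] = 0
def sufList : List Int → List Int
  | [] => [0]
  | v :: vs => max ((sufList vs).headD 0) v :: sufList vs

-- the forward loop: run = max(0, prev[0..j-1]); third list is suf shifted by one (suf[j+1])
def fwd (run : Int) : List Int → List Int → List Int → List Int
  | p :: ps, r :: rs, s :: ss => (max run s + r) :: fwd (max run p) ps rs ss
  | _, _, _ => []

def eating_alt (data : List (List Int)) : Int :=
  let last := (data.drop 1).foldl
    (fun prev row => fwd 0 prev row ((sufList prev).drop 1)) (data.headD [])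
  pyMax last

-- ===== PRECONDITION & SPEC =====
-- Pre_ is exactly where Python A returns: data nonempty (else IndexError on data[0]),
-- first row nonempty (else max([]) ValueError), and every row at least as long as the
-- first (else data[i][j] IndexError).
def Pre_eating (data : List (List Int)) : Prop :=
  data ≠ [] ∧ data.headD [] ≠ [] ∧ ∀ row ∈ data, (data.headD []).length ≤ row.length
instance (data : List (List Int)) : Decidable (Pre_eating data) := by unfold Pre_eating; infer_instance
def pvWitness_eating : List (List Int) := [[1, 2], [3, 4]]

def Spec_eating (data : List (List Int)) (out : Int) : Prop := out = eating_alt data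
instance (data : List (List Int)) (out : Int) : Decidable (Spec_eating data out) := by unfold Spec_eating; infer_instance

-- ===== CLAIM (what is proved, stated in full; the proofs are below) =====
def Claim_equal_eating : Prop := ∀ (data : List (List Int)), Dom_eating data → Pre_eating data → Spec_eating data (eating data)

-- ===== LEMMAS AND PROOFS =====

-- max(0, max l)
def M0 (l : List Int) : Int := l.foldr max 0

theorem M0_nonneg (l : List Int) : 0 ≤ M0 l := by
  induction l with
  | nil => simp [M0]
  | cons x xs ih => simp only [M0, List.foldr] at *; omega

theorem foldr_max_init (a : List Int) (c : Int) (h : 0 ≤ c) :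
    a.foldr max c = max (M0 a) c := by
  induction a with
  | nil => simp [M0]; omega
  | cons x xs ih => simp only [M0, List.foldr] at *; omega

theorem M0_append (a b : List Int) : M0 (a ++ b) = max (M0 a) (M0 b) := by
  simp only [M0, List.foldr_append]
  exact foldr_max_init a (M0 b) (M0_nonneg b)

theorem sufList_headD (l : List Int) : (sufList l).headD 0 = M0 l := by
  induction l with
  | nil => simp [sufList, M0]
  | cons v vs ih => simp only [sufList, M0, List.foldr, List.headD] at *; omega

theorem amax_eq (prev : List Int) (j n : Nat) (h : n ≤ prev.length) :
    (List.range n).foldl (fun acc k => if j ≠ k then max (prev.getD k 0) acc else acc) 0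
      = M0 ((prev.take n).eraseIdx j) := by
  induction n with
  | zero => simp [M0]
  | succ n ih =>
    have hn : n < prev.length := by omega
    have ht : prev.take (n + 1) = prev.take n ++ [prev.getD n 0] := by
      rw [List.take_add_one]
      simp [List.getD_eq_getElem?_getD, List.getElem?_eq_getElem hn]
    have hlt : (prev.take n).length = n := by rw [List.length_take]; omega
    rw [List.range_succ, List.foldl_append]
    simp only [List.foldl]
    rw [ih (by omega), ht]
    by_cases hj : j = n
    · subst hj
      rw [if_neg (by simp), List.eraseIdx_append_of_length_le (by omega) _, hlt,
        List.eraseIdx_of_length_le (by omega)]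
      simp
    · rcases Nat.lt_or_ge j n with hjn | hjn
      · rw [if_pos (by omega), List.eraseIdx_append_of_lt_length (by omega) _, M0_append]
        have h1 := M0_nonneg ((prev.take n).eraseIdx j)
        have h2 : M0 [prev.getD n 0] = max (prev.getD n 0) 0 := rfl
        omega
      · rw [if_pos (by omega), List.eraseIdx_of_length_le (by omega),
          List.eraseIdx_append_of_length_le (by omega) _, hlt,
          List.eraseIdx_of_length_le (by simp; omega), M0_append]
        have h1 := M0_nonneg (prev.take n)
        have h2 : M0 [prev.getD n 0] = max (prev.getD n 0) 0 := rfl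
        omega

theorem foldl_push {α β : Type} (l : List α) (f : α → β) (init : List β) :
    l.foldl (fun acc x => acc ++ [f x]) init = init ++ l.map f := by
  induction l generalizing init with
  | nil => simp
  | cons x xs ih => simp [List.foldl, ih]

theorem fwd_spec (prev : List Int) : ∀ (row : List Int) (run : Int),
    prev.length ≤ row.length →
    fwd run prev row ((sufList prev).drop 1)
      = (List.range prev.length).map
          (fun j => max (max run (M0 (prev.take j))) (M0 (prev.drop (j + 1))) + row.getD j 0) := by
  induction prev with
  | nil => intro row run _; rfl
  | cons p ps ih =>
    intro row run h
    cases row with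
    | nil => simp at h
    | cons r rs =>
      cases ps with
      | nil =>
        have h0 : max run 0 + r = max (max run 0) 0 + r := by omega
        simp [fwd, sufList, M0, h0]
      | cons q qs =>
        have hs : (sufList (p :: q :: qs)).drop 1 = sufList (q :: qs) := rfl
        rw [hs]
        show (max run (max ((sufList qs).headD 0) q) + r)
              :: fwd (max run p) (q :: qs) rs (sufList qs) = _
        have hs2 : sufList qs = (sufList (q :: qs)).drop 1 := rfl
        rw [sufList_headD, hs2, ih rs (max run p) (by simpa using h)]
        conv_rhs => rw [List.length_cons, List.range_succ_eq_map, List.map_cons, List.map_map]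
        rw [List.cons_eq_cons]
        constructor
        · have hq := M0_nonneg qs
          simp only [M0] at hq ⊢
          simp only [List.take_zero, List.foldr, List.drop_succ_cons, List.drop_zero,
            List.getD_cons_zero]
          omega
        · apply List.map_congr_left
          intro j _
          simp only [Function.comp, List.take_succ_cons, List.drop_succ_cons,
            List.getD_cons_succ, M0, List.foldr]
          omega

theorem fwd_len (prev row : List Int) (h : prev.length ≤ row.length) :
    (fwd 0 prev row ((sufList prev).drop 1)).length = prev.length := by
  rw [fwd_spec prev row 0 h]; simp

theorem row_eq (prev row : List Int) (h : prev.length ≤ row.length) :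
    eatingRow prev row prev.length = fwd 0 prev row ((sufList prev).drop 1) := by
  rw [fwd_spec prev row 0 h]
  unfold eatingRow
  rw [foldl_push, List.nil_append]
  apply List.map_congr_left
  intro j hj
  unfold eatingInner
  rw [amax_eq prev j prev.length (le_refl _), List.take_length,
    List.eraseIdx_eq_take_drop_succ, M0_append]
  have h1 := M0_nonneg (prev.take j)
  have h2 := M0_nonneg (prev.drop (j + 1))
  omega

theorem outer (m : Nat) (rows : List (List Int)) : ∀ (ans : List (List Int)) (prev : List Int),
    ans.getLastD [] = prev → prev.length = m → (∀ row ∈ rows, m ≤ row.length) →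
    (rows.foldl (fun a row => a ++ [eatingRow (a.getLastD []) row m]) ans).getLastD []
      = rows.foldl (fun p row => fwd 0 p row ((sufList p).drop 1)) prev := by
  induction rows with
  | nil => intro ans prev h1 _ _; simpa using h1
  | cons row rest ih =>
    intro ans prev h1 h2 h3
    simp only [List.foldl]
    have hr : prev.length ≤ row.length := by rw [h2]; exact h3 row (by simp)
    have heq : eatingRow (ans.getLastD []) row m = fwd 0 prev row ((sufList prev).drop 1) := by
      rw [h1, ← h2]; exact row_eq prev row hr
    rw [heq]
    apply ih
    · simp
    · rw [fwd_len prev row hr, h2]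
    · exact fun r hrm => h3 r (by simp [hrm])

-- ===== VERDICT (by name: the statement is the Claim_ definition above) =====
theorem eating_spec : Claim_equal_eating := by
  intro data _ hpre
  obtain ⟨hne, hh, hlen⟩ := hpre
  cases data with
  | nil => exact absurd rfl hne
  | cons d0 rest =>
    show eating _ = eating_alt _
    unfold eating eating_alt
    simp only [List.headD, List.drop_one, List.tail_cons]
    rw [outer d0.length rest [d0] d0 rfl rfl
      (fun r hr => hlen r (by simp [hr]))]
    simp only [List.drop_one]
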